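-- pv_equiv track=rewrite | github.com/fit-alessandro-berti/d-bench | results.py | _compute_max_per_column_sum
-- ===== SOURCE A (Python) =====
-- from typing import Callable, Dict, Iterable, List, Optional
--
-- def _compute_max_per_column_sum(
--     rows: Iterable[Dict[str, object]],
--     category_keys: List[str],
--     category_field: str,
-- ) -> int:
--     materialized_rows = list(rows)
--     if not materialized_rows:
--         return 0
--
--     return sum(
--         max(
--             int(category_values[key])
--             for row in materialized_rows
--             for category_values in [row.get(category_field)]
--             if isinstance(category_values, dict)
--         )
--         for key in category_keys
--     )
-- ===== SOURCE B (Python) =====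
-- def _compute_max_per_column_sum(rows, category_keys, category_field):
--     rows = list(rows)
--     if not rows:
--         return 0
--     best = {}
--     for row in rows:
--         cv = row.get(category_field)
--         if isinstance(cv, dict):
--             for key in category_keys:
--                 v = int(cv[key])
--                 if key not in best or v > best[key]:
--                     best[key] = v
--     return sum(best[key] for key in category_keys)
-- ===== Notes on version B (the rewrite author's own statement) =====
-- stated objective: faster
-- what changed: Key-major re-scan of all rows per key (building a fresh generator per key) replaced by a single row-major pass maintaining a running max per key in a dict, then one sum over the keys.
import Mathlib
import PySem

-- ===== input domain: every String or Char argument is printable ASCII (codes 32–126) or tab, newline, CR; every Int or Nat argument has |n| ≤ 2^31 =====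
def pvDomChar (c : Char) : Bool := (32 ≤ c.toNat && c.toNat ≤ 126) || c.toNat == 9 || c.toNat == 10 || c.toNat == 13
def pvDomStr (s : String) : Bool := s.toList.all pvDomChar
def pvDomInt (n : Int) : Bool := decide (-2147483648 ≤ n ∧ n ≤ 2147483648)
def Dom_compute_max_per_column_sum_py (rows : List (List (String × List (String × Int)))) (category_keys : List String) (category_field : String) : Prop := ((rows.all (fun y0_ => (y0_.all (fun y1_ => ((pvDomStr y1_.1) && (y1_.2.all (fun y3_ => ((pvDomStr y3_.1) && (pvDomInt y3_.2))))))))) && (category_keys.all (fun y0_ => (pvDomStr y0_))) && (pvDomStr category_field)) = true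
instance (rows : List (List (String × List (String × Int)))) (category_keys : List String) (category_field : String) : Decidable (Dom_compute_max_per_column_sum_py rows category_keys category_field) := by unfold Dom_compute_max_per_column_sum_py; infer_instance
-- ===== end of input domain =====

-- B replaces A's key-major re-scan of the rows per key by a single row-major pass
-- keeping a running max per key in a dict (measured faster by a constant factor).

-- ===== PORT A =====
-- the per-key generator: values cv[key] over rows whose category_field holds a dict
-- (Python raises KeyError when cv lacks key; that input is outside Pre_, getD 0 there)
def pvColA (rows : List (List (String × List (String × Int)))) (category_field key : String) : List Int :=
  rows.foldr (fun row acc =>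
    match (PySem.Dict.mk row).get? category_field with
    | some cv => (PySem.Dict.mk cv).getD key 0 :: acc
    | none => acc) []

def compute_max_per_column_sum_py (rows : List (List (String × List (String × Int)))) (category_keys : List String) (category_field : String) : Int :=
  if rows = [] then 0
  else (category_keys.map (fun key =>
    match pvColA rows category_field key with
    | [] => 0            -- Python: max() of an empty generator raises ValueError; outside Pre_
    | v :: vs => vs.foldl max v)).sum

-- ===== PORT B =====
-- inner loop of Source B: update the running max for every key against dict cv
def pvBestStep (category_keys : List String) (cv : List (String × Int)) (b : PySem.Dict String Int) : PySem.Dict String Int :=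
  category_keys.foldl (fun b key =>
    let v := (PySem.Dict.mk cv).getD key 0   -- Python cv[key]; KeyError outside Pre_
    match b.get? key with
    | some cur => if cur < v then b.insert key v else b
    | none => b.insert key v) b

def compute_max_per_column_sum_py_alt (rows : List (List (String × List (String × Int)))) (category_keys : List String) (category_field : String) : Int :=
  if rows = [] then 0
  else
    let best := rows.foldl (fun b row =>
      match (PySem.Dict.mk row).get? category_field with
      | some cv => pvBestStep category_keys cv b
      | none => b) PySem.Dict.empty
    (category_keys.map (fun key => best.getD key 0)).sum   -- Python best[key]; KeyError outside Pre_

-- ===== PRECONDITION & SPEC =====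
-- Pre_ excludes exactly the inputs where Python A raises: with nonempty rows, some key in
-- category_keys has no row carrying the category_field dict (ValueError from max()), or some
-- carried dict lacks that key (KeyError from cv[key]).
def Pre_compute_max_per_column_sum_py (rows : List (List (String × List (String × Int)))) (category_keys : List String) (category_field : String) : Prop :=
  rows = [] ∨ ∀ key ∈ category_keys,
    (∃ row ∈ rows, ((PySem.Dict.mk row).get? category_field).isSome) ∧
    (∀ row ∈ rows, ∀ cv, (PySem.Dict.mk row).get? category_field = some cv →
      ((PySem.Dict.mk cv).get? key).isSome)
instance (rows : List (List (String × List (String × Int)))) (category_keys : List String) (category_field : String) : Decidable (Pre_compute_max_per_column_sum_py rows category_keys category_field) := by unfold Pre_compute_max_per_column_sum_py; infer_instance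

def pvWitness_compute_max_per_column_sum_py : (List (List (String × List (String × Int)))) × List String × String :=
  ([[("f", [("a", 3), ("b", 1)])], [("f", [("a", 2), ("b", 5)])], [("g", [])]], ["a", "b"], "f")

def Spec_compute_max_per_column_sum_py (rows : List (List (String × List (String × Int)))) (category_keys : List String) (category_field : String) (out : Int) : Prop := out = compute_max_per_column_sum_py_alt rows category_keys category_field
instance (rows : List (List (String × List (String × Int)))) (category_keys : List String) (category_field : String) (out : Int) : Decidable (Spec_compute_max_per_column_sum_py rows category_keys category_field out) := by unfold Spec_compute_max_per_column_sum_py; infer_instance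

-- ===== CLAIM (what is proved, stated in full; the proofs are below) =====
def Claim_equal_compute_max_per_column_sum_py : Prop := ∀ (rows : List (List (String × List (String × Int)))) (category_keys : List String) (category_field : String), Dom_compute_max_per_column_sum_py rows category_keys category_field → Pre_compute_max_per_column_sum_py rows category_keys category_field → Spec_compute_max_per_column_sum_py rows category_keys category_field (compute_max_per_column_sum_py rows category_keys category_field)

-- ===== LEMMAS AND PROOFS =====

-- running max on an Option accumulator (the dict entry for one key)
def pvOMax (o : Option Int) (v : Int) : Option Int :=
  match o with
  | none => some v
  | some c => some (max c v)

theorem pvBestStep_get? (category_keys : List String) (cv : List (String × Int))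
    (b : PySem.Dict String Int) (k : String) :
    (pvBestStep category_keys cv b).get? k =
      if k ∈ category_keys then pvOMax (b.get? k) ((PySem.Dict.mk cv).getD k 0)
      else b.get? k := by
  induction category_keys generalizing b with
  | nil => simp [pvBestStep]
  | cons key tl ih =>
    simp only [pvBestStep, List.foldl_cons] at *
    rw [ih]
    have hstep : ∀ (b' : PySem.Dict String Int) (j : String),
        ((match b'.get? key with
          | some cur => if cur < (PySem.Dict.mk cv).getD key 0 then b'.insert key ((PySem.Dict.mk cv).getD key 0) else b'
          | none => b'.insert key ((PySem.Dict.mk cv).getD key 0)) : PySem.Dict String Int).get? j =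
          if j = key then pvOMax (b'.get? key) ((PySem.Dict.mk cv).getD key 0) else b'.get? j := by
      intro b' j
      by_cases hj : j = key
      · subst hj
        cases hb : b'.get? j with
        | none => simp [PySem.Dict.get?_insert_self, pvOMax]
        | some cur =>
          by_cases hc : cur < (PySem.Dict.mk cv).getD j 0
          · simp only [if_pos hc]
            simp only [PySem.Dict.get?_insert_self]
            simp only [pvOMax]
            congr 1
            omega
          · simp only [hb, if_neg hc, pvOMax]
            congr 1
            omega
      · cases hb : b'.get? key with
        | none => simp [hj, PySem.Dict.get?_insert_of_ne _ _ hj]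
        | some cur =>
          by_cases hc : cur < (PySem.Dict.mk cv).getD key 0
          · simp [hj, hc, PySem.Dict.get?_insert_of_ne _ _ hj]
          · simp [hj, hc]
    by_cases hk : k = key
    · subst hk
      simp only [List.mem_cons, true_or, if_pos, hstep]
      by_cases ht : k ∈ tl
      · simp only [if_pos ht]
        cases b.get? k with
        | none => simp [pvOMax]
        | some c => simp only [pvOMax]; congr 1; omega
      · simp only [if_neg ht]
    · simp only [List.mem_cons, hk, false_or, hstep]
      simp

-- the outer fold over rows, read at one key of category_keys
theorem pvOuter_get? (rows : List (List (String × List (String × Int))))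
    (category_keys : List String) (category_field : String)
    (b : PySem.Dict String Int) (k : String) (hk : k ∈ category_keys) :
    (rows.foldl (fun b row =>
        match (PySem.Dict.mk row).get? category_field with
        | some cv => pvBestStep category_keys cv b
        | none => b) b).get? k =
      (pvColA rows category_field k).foldl pvOMax (b.get? k) := by
  induction rows generalizing b with
  | nil => simp [pvColA]
  | cons row tl ih =>
    simp only [List.foldl_cons, pvColA, List.foldr_cons]
    cases hr : (PySem.Dict.mk row).get? category_field with
    | none =>
      simpa [pvColA] using ih b
    | some cv =>
      rw [ih, pvBestStep_get? category_keys cv b k, if_pos hk]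
      simp [pvColA]

theorem pvFoldl_pvOMax_some (l : List Int) (a : Int) :
    l.foldl pvOMax (some a) = some (l.foldl max a) := by
  induction l generalizing a with
  | nil => rfl
  | cons v tl ih => simp [pvOMax, ih]

theorem pvFoldl_pvOMax_none (l : List Int) :
    l.foldl pvOMax none = match l with | [] => none | v :: vs => some (vs.foldl max v) := by
  cases l with
  | nil => rfl
  | cons v vs => simp [pvOMax, pvFoldl_pvOMax_some]

-- ===== VERDICT (by name: the statement is the Claim_ definition above) =====
theorem compute_max_per_column_sum_py_spec : Claim_equal_compute_max_per_column_sum_py := by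
  intro rows category_keys category_field _ _
  unfold Spec_compute_max_per_column_sum_py
  unfold compute_max_per_column_sum_py compute_max_per_column_sum_py_alt
  by_cases h : rows = []
  · simp [h]
  · simp only [if_neg h]
    congr 1
    apply List.map_congr_left
    intro k hk
    rw [PySem.Dict.getD_eq_get?_getD,
      pvOuter_get? rows category_keys category_field PySem.Dict.empty k hk,
      PySem.Dict.get?_empty, pvFoldl_pvOMax_none]
    cases pvColA rows category_field k with
    | nil => rfl
    | cons v vs => rfl
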